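-- pv_equiv track=rewrite | github.com/Arsen1302/Code-copy-detector | TestData/solutions/problem_555_5.py | solution_555_5
-- ===== SOURCE A (Python) =====
-- def solution_555_5(n: int) -> int:
--     l = []
--     ans = 0
--     s = bin(n)[2:]
--     for i in range(len(s)):
--         if s[i] == '1':
--             l.append(i)
--     if len(l)<=1:
--         return 0
--     if len(l)==2:
--         return l[-1]-l[0]
--     for i in range(1,len(l)):
--         ans = max(ans, l[i]-l[i-1])
--     return ans
-- ===== SOURCE B (Python) =====
-- def solution_555_5(n: int) -> int:
--     prev = None
--     ans = 0
--     for i, c in enumerate(bin(n)[2:]):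
--         if c == '1':
--             if prev is not None:
--                 ans = max(ans, i - prev)
--             prev = i
--     return ans
-- ===== Notes on version B (the rewrite author's own statement) =====
-- stated objective: simpler
-- what changed: Replaces A's materialised list of '1'-positions plus three post-hoc branches (0/1, 2, >2 set bits) and a second indexing loop with one enumerate pass keeping only the previous '1' index and the running maximum gap.
import Mathlib
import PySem

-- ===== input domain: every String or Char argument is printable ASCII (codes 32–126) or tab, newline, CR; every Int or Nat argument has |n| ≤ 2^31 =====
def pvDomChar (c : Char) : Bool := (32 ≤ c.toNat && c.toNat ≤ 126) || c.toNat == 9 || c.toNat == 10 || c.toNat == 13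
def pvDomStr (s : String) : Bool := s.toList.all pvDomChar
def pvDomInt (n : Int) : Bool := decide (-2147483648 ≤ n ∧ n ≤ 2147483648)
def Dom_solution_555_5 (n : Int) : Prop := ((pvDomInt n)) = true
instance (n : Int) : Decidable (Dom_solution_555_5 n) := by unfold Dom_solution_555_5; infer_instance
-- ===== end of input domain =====

-- B replaces A's materialised '1'-position list + three branches + second indexing loop
-- by one enumerate pass keeping the previous '1' index and the running max gap (simpler).

-- ===== PORT A =====
def solution_555_5 (n : Int) : Int :=
  let s := PySem.List.slice (PySem.Int.toBinChars0b n) (some 2) none   -- s = bin(n)[2:]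
  let l := (PySem.List.pyRange 0 (PySem.List.len s) 1).foldl
      (fun l i => if PySem.List.pyGetD s i ' ' = '1' then l ++ [i] else l) ([] : List Int)
  if PySem.List.len l ≤ 1 then 0
  else if PySem.List.len l = 2 then PySem.List.pyGetD l (-1) 0 - PySem.List.pyGetD l 0 0
  else (PySem.List.pyRange 1 (PySem.List.len l) 1).foldl
      (fun ans i => max ans (PySem.List.pyGetD l i 0 - PySem.List.pyGetD l (i - 1) 0)) 0

-- ===== PORT B =====
def solution_555_5_alt (n : Int) : Int :=
  let s := PySem.List.slice (PySem.Int.toBinChars0b n) (some 2) none   -- s = bin(n)[2:]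
  ((PySem.List.enumerate s 0).foldl
    (fun (st : Option Int × Int) (p : Int × Char) =>
      if p.2 = '1' then
        (some p.1, match st.1 with | none => st.2 | some prev => max st.2 (p.1 - prev))
      else st) (none, 0)).2

-- ===== PRECONDITION & SPEC =====
def Spec_solution_555_5 (n : Int) (out : Int) : Prop := out = solution_555_5_alt n
instance (n : Int) (out : Int) : Decidable (Spec_solution_555_5 n out) := by unfold Spec_solution_555_5; infer_instance

-- ===== CLAIM (what is proved, stated in full; the proofs are below) =====
def Claim_equal_solution_555_5 : Prop := ∀ (n : Int), Dom_solution_555_5 n → Spec_solution_555_5 n (solution_555_5 n)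

-- ===== LEMMAS AND PROOFS =====

-- running max of gaps along a list, given the previous '1' position q
def gapFold : Int → Int → List Int → Int
  | _, a, [] => a
  | q, a, p :: ps => gapFold p (max a (p - q)) ps

-- B's state fold, once the previous position is known, is gapFold
theorem bfold_eq_gapFold (ps : List Int) (q a : Int) :
    (ps.foldl
      (fun (st : Option Int × Int) (j : Int) =>
        (some j, match st.1 with | none => st.2 | some prev => max st.2 (j - prev)))
      (some q, a)).2 = gapFold q a ps := by
  induction ps generalizing q a with
  | nil => rfl
  | cons p ps ih => simpa [gapFold] using ih p (max a (p - q))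

theorem getD_append_cons (pre : List Int) (x : Int) (ys : List Int) (d : Int) :
    (pre ++ x :: ys).getD pre.length d = x := by
  simp [List.getD_eq_getElem?_getD]

-- A's second loop, read from position pre.length+1, is gapFold
theorem aloop_eq_gapFold (ys : List Int) : ∀ (pre : List Int) (x a : Int),
    (PySem.List.pyRange ((pre.length : Int) + 1) (PySem.List.len (pre ++ x :: ys)) 1).foldl
      (fun ans i => max ans (PySem.List.pyGetD (pre ++ x :: ys) i 0
                             - PySem.List.pyGetD (pre ++ x :: ys) (i - 1) 0)) a
    = gapFold x a ys := by
  induction ys with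
  | nil =>
      intro pre x a
      rw [PySem.List.pyRange_one_eq_nil (by simp)]
      rfl
  | cons y ys ih =>
      intro pre x a
      rw [PySem.List.pyRange_one_cons (by
        simp only [PySem.List.len_eq, List.length_append, List.length_cons]
        omega)]
      simp only [List.foldl_cons]
      have h1 : PySem.List.pyGetD (pre ++ x :: y :: ys) ((pre.length : Int) + 1) 0 = y := by
        have : ((pre.length : Int) + 1) = (((pre.length + 1 : Nat)) : Int) := by push_cast; ring
        rw [this, PySem.List.pyGetD_natCast]
        have : pre ++ x :: y :: ys = (pre ++ [x]) ++ y :: ys := by simp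
        rw [this]
        have hl : pre.length + 1 = (pre ++ [x]).length := by simp
        rw [hl]
        exact getD_append_cons (pre ++ [x]) y ys 0
      have h2 : PySem.List.pyGetD (pre ++ x :: y :: ys) ((pre.length : Int) + 1 - 1) 0 = x := by
        have : ((pre.length : Int) + 1 - 1) = ((pre.length : Nat) : Int) := by ring
        rw [this, PySem.List.pyGetD_natCast]
        exact getD_append_cons pre x (y :: ys) 0
      rw [h1, h2]
      have hassoc : pre ++ x :: y :: ys = (pre ++ [x]) ++ y :: ys := by simp
      have hlen : (pre.length : Int) + 1 + 1 = (((pre ++ [x]).length : Nat) : Int) + 1 := by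
        simp only [List.length_append, List.length_cons, List.length_nil]; push_cast; ring
      calc (PySem.List.pyRange ((pre.length : Int) + 1 + 1) (PySem.List.len (pre ++ x :: y :: ys)) 1).foldl
            (fun ans i => max ans (PySem.List.pyGetD (pre ++ x :: y :: ys) i 0
                                   - PySem.List.pyGetD (pre ++ x :: y :: ys) (i - 1) 0))
            (max a (y - x))
          = (PySem.List.pyRange (((pre ++ [x]).length : Int) + 1) (PySem.List.len ((pre ++ [x]) ++ y :: ys)) 1).foldl
            (fun ans i => max ans (PySem.List.pyGetD ((pre ++ [x]) ++ y :: ys) i 0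
                                   - PySem.List.pyGetD ((pre ++ [x]) ++ y :: ys) (i - 1) 0))
            (max a (y - x)) := by rw [← hassoc, ← hlen]
        _ = gapFold y (max a (y - x)) ys := ih (pre ++ [x]) y (max a (y - x))
        _ = gapFold x a (y :: ys) := rfl

-- A's branch structure, on a strictly increasing position list L, equals B's fold
theorem branches_eq_bfold (L : List Int) (hL : L.Pairwise (· < ·)) :
    (if PySem.List.len L ≤ 1 then 0
     else if PySem.List.len L = 2 then PySem.List.pyGetD L (-1) 0 - PySem.List.pyGetD L 0 0
     else (PySem.List.pyRange 1 (PySem.List.len L) 1).foldl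
        (fun ans i => max ans (PySem.List.pyGetD L i 0 - PySem.List.pyGetD L (i - 1) 0)) 0)
    = (L.foldl
        (fun (st : Option Int × Int) (j : Int) =>
          (some j, match st.1 with | none => st.2 | some prev => max st.2 (j - prev)))
        (none, 0)).2 := by
  match L, hL with
  | [], _ => rfl
  | [x], _ => rfl
  | [x, y], hL =>
      have hxy : x < y := by simp at hL; omega
      have h1 : PySem.List.pyGetD [x, y] (-1) 0 = y := rfl
      have h2 : PySem.List.pyGetD [x, y] 0 0 = x := rfl
      rw [if_neg (by simp [PySem.List.len_eq] : ¬ PySem.List.len [x, y] ≤ 1),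
          if_pos (by simp [PySem.List.len_eq] : PySem.List.len [x, y] = 2), h1, h2]
      simp only [List.foldl_cons, List.foldl_nil]
      omega
  | x :: y :: z :: ys, hL =>
      have hlen : ¬ PySem.List.len (x :: y :: z :: ys) ≤ 1 := by simp [PySem.List.len_eq]; omega
      have hlen2 : ¬ PySem.List.len (x :: y :: z :: ys) = 2 := by simp [PySem.List.len_eq]; omega
      rw [if_neg hlen, if_neg hlen2]
      have ha := aloop_eq_gapFold (y :: z :: ys) [] x 0
      simp only [List.nil_append, List.length_nil, Nat.cast_zero, zero_add] at ha
      rw [ha]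
      simp only [List.foldl_cons]
      rw [bfold_eq_gapFold]
      rfl

-- B's enumerate-and-skip pass is the fold of its '1'-step over the filtered index list
theorem bside_eq_filter_fold (s : List Char) :
    ((PySem.List.enumerate s 0).foldl
      (fun (st : Option Int × Int) (p : Int × Char) =>
        if p.2 = '1' then
          (some p.1, match st.1 with | none => st.2 | some prev => max st.2 (p.1 - prev))
        else st) (none, 0)).2
    = (((PySem.List.pyRange 0 (PySem.List.len s) 1).filter
          (fun i => decide (PySem.List.pyGetD s i ' ' = '1'))).foldl
        (fun (st : Option Int × Int) (j : Int) =>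
          (some j, match st.1 with | none => st.2 | some prev => max st.2 (j - prev)))
        (none, 0)).2 := by
  rw [PySem.List.enumerate_eq_map_pyRange (d := ' '), List.foldl_map]
  rw [PySem.List.foldl_ite_eq_foldl_filter
      (p := fun j => PySem.List.pyGetD s j ' ' = '1')
      (f := fun (st : Option Int × Int) (j : Int) =>
          (some j, match st.1 with | none => st.2 | some prev => max st.2 (j - prev)))]

-- ===== VERDICT (by name: the statement is the Claim_ definition above) =====
theorem solution_555_5_spec : Claim_equal_solution_555_5 := by
  intro n _
  unfold Spec_solution_555_5 solution_555_5 solution_555_5_alt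
  simp only []
  generalize PySem.List.slice (PySem.Int.toBinChars0b n) (some 2) none = s
  rw [bside_eq_filter_fold s]
  rw [PySem.List.foldl_append_ite_eq_filter]
  simp only [List.nil_append]
  exact branches_eq_bfold _ ((PySem.List.pairwise_lt_pyRange_one 0 (PySem.List.len s)).filter _)
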